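-- pv_equiv track=rewrite | github.com/samkiell/SKDL | bot/services/moviebox.py | _select_download
-- ===== SOURCE A (Python) =====
-- def _normalize_quality(quality: str) -> str:
--     """Convert quality string to moviebox-api format (e.g. '1080p' -> '1080P')."""
--     q = quality.strip().upper()
--     if q in ("BEST", "WORST"):
--         return q
--     # Strip trailing P and re-add uppercase
--     q = q.rstrip("P") + "P"
--     return q
--
-- def _extract_quality_value(quality: str) -> int | None:
--     digits = "".join(ch for ch in quality if ch.isdigit())
--     if not digits:
--         return None
--     try:
--         return int(digits)
--     except ValueError:
--         return None
--
-- def _select_download(downloads: list[dict], quality: str) -> dict: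
--     normalized_quality = _normalize_quality(quality)
--     sorted_downloads = sorted(
--         downloads,
--         key=lambda item: int(item.get("resolution", 0) or 0),
--         reverse=True,
--     )
--
--     if normalized_quality == "BEST":
--         return sorted_downloads[0]
--
--     requested = _extract_quality_value(normalized_quality)
--     if requested is None:
--         return sorted_downloads[0]
--
--     for item in sorted_downloads:
--         if int(item.get("resolution", 0) or 0) == requested:
--             return item
--
--     return sorted_downloads[0]
-- ===== SOURCE B (Python) =====
-- def _normalize_quality(quality: str) -> str:
--     q = quality.strip().upper()
--     if q in ("BEST", "WORST"):
--         return q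
--     q = q.rstrip("P") + "P"
--     return q
--
-- def _extract_quality_value(quality: str) -> int | None:
--     digits = "".join(ch for ch in quality if ch.isdigit())
--     if not digits:
--         return None
--     try:
--         return int(digits)
--     except ValueError:
--         return None
--
-- def _select_download(downloads: list[dict], quality: str) -> dict:
--     # One pass (no sort): running first-seen maximum + first item matching the
--     # requested resolution; Python's stable reverse sort makes A's choices the same.
--     normalized_quality = _normalize_quality(quality)
--     requested = None if normalized_quality == "BEST" else _extract_quality_value(normalized_quality)
--     best = None
--     match = None
--     for item in downloads:
--         r = int(item.get("resolution", 0) or 0)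
--         if best is None or r > best[0]:
--             best = (r, item)
--         if match is None and r == requested:
--             match = item
--     if match is not None:
--         return match
--     return best[1]
-- ===== Notes on version B (the rewrite author's own statement) =====
-- stated objective: alternative
-- what changed: B replaces A's stable reverse sort followed by an indexed/scanned lookup with a single pass over downloads that keeps a first-seen running maximum and the first item matching the requested resolution.
import Mathlib
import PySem

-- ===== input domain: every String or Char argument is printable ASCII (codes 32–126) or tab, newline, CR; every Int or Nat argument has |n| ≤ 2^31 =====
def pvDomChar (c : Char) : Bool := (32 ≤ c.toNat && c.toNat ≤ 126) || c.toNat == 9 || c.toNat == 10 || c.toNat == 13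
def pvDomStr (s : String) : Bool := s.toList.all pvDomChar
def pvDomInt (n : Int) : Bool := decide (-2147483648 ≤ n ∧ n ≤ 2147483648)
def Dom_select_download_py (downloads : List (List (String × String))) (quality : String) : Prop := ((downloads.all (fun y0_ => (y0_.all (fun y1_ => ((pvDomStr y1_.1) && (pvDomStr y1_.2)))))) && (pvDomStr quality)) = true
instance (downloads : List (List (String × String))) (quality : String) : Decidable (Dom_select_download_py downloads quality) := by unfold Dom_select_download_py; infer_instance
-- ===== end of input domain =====

-- B replaces A's sort-then-scan with a single pass keeping the first-seen running maximum and the first requested match (same values; B does not sort).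

-- ===== PORT A =====
-- shared module helpers (_normalize_quality, _extract_quality_value, and the sort key
-- int(item.get("resolution", 0) or 0), used verbatim by both Pythons)
def pvNormalizeQuality (quality : String) : String :=
  let q := PySem.Str.upper (PySem.Str.strip quality)
  if q = "BEST" ∨ q = "WORST" then q
  else
    -- q.rstrip("P") + "P" : exact — drops the trailing run of 'P' code points, re-appends one
    String.ofList ((q.toList.reverse.dropWhile (fun c => c == 'P')).reverse ++ ['P'])

def pvExtractQualityValue (quality : String) : Option Int :=
  -- ch.isdigit() is exactly '0'..'9' on the printable-ASCII domain
  let digits := quality.toList.filter (fun c => '0' ≤ c && c ≤ '9')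
  if digits = [] then none
  else PySem.Int.ofChars? digits   -- int(digits); the except ValueError branch is ofChars? = none

def pvResKey (item : List (String × String)) : Int :=
  -- int(item.get("resolution", 0) or 0); Pre_ excludes the inputs where int(...) raises ValueError
  match (PySem.Dict.mk item).get? "resolution" with
  | none => 0
  | some r => if r = "" then 0 else (PySem.Int.ofStr? r).getD 0

def select_download_py (downloads : List (List (String × String))) (quality : String) : List (String × String) :=
  let nq := pvNormalizeQuality quality
  let sortedD := PySem.List.sorted downloads pvResKey true
  if nq = "BEST" then (PySem.List.pyGet? sortedD 0).getD []   -- sorted_downloads[0]; IndexError (empty list) excluded by Pre_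
  else
    match pvExtractQualityValue nq with
    | none => (PySem.List.pyGet? sortedD 0).getD []
    | some requested =>
      match sortedD.find? (fun item => pvResKey item == requested) with
      | some item => item
      | none => (PySem.List.pyGet? sortedD 0).getD []

-- ===== PORT B =====
def select_download_py_alt (downloads : List (List (String × String))) (quality : String) : List (String × String) :=
  let nq := pvNormalizeQuality quality
  let requested : Option Int := if nq = "BEST" then none else pvExtractQualityValue nq
  let st := downloads.foldl
    (fun (s : Option (Int × List (String × String)) × Option (List (String × String))) item =>
      let r := pvResKey item
      (match s.1 with
       | none => some (r, item)
       | some b => if r > b.1 then some (r, item) else some b,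
       match s.2 with
       | some m => some m
       | none => if (some r : Option Int) == requested then some item else none))
    (none, none)
  match st.2 with
  | some m => m
  | none =>
    match st.1 with
    | some b => b.2
    | none => []   -- unreachable under Pre_ (downloads ≠ []); the Python B dereferences None here

-- ===== PRECONDITION & SPEC =====
-- Pre_ excludes exactly the inputs where the Python A raises: an empty downloads list
-- (IndexError on sorted_downloads[0]) and any item whose "resolution" value is a non-empty
-- string that int() cannot parse (ValueError inside the sort key).
def Pre_select_download_py (downloads : List (List (String × String))) (quality : String) : Prop :=
  downloads ≠ [] ∧
  downloads.all (fun item =>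
    match (PySem.Dict.mk item).get? "resolution" with
    | none => true
    | some r => r == "" || (PySem.Int.ofStr? r).isSome) = true
instance (downloads : List (List (String × String))) (quality : String) : Decidable (Pre_select_download_py downloads quality) := by unfold Pre_select_download_py; infer_instance

def pvWitness_select_download_py : (List (List (String × String))) × String :=
  ([[("resolution", "1080"), ("url", "u1")], [("resolution", "720"), ("url", "u2")]], "720p")

def Spec_select_download_py (downloads : List (List (String × String))) (quality : String) (out : List (String × String)) : Prop := out = select_download_py_alt downloads quality
instance (downloads : List (List (String × String))) (quality : String) (out : List (String × String)) : Decidable (Spec_select_download_py downloads quality out) := by unfold Spec_select_download_py; infer_instance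

-- ===== CLAIM (what is proved, stated in full; the proofs are below) =====
def Claim_equal_select_download_py : Prop := ∀ (downloads : List (List (String × String))) (quality : String), Dom_select_download_py downloads quality → Pre_select_download_py downloads quality → Spec_select_download_py downloads quality (select_download_py downloads quality)

-- ===== LEMMAS AND PROOFS =====

-- sorted_downloads[0] is head?
theorem pv_pyGet0 (xs : List (List (String × String))) (d : List (String × String)) :
    (PySem.List.pyGet? xs 0).getD d = xs.head?.getD d := by
  cases xs <;> simp [PySem.List.pyGet?, PySem.List.pyIdx?]

-- inserting x into a key-descending list: the first match of a key-test is the old first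
-- match, else x itself when x matches (stability of one insertion step)
theorem pv_find_insertBy (req : Int) (x : List (String × String)) (l : List (List (String × String)))
    (hl : l.Pairwise (fun a b => pvResKey b ≤ pvResKey a)) :
    (PySem.List.insertBy (fun a b => decide (pvResKey b < pvResKey a)) x l).find?
        (fun it => pvResKey it == req)
      = (l.find? (fun it => pvResKey it == req)).or
          (if pvResKey x == req then some x else none) := by
  induction l with
  | nil => cases h : (pvResKey x == req) <;> simp [PySem.List.insertBy, List.find?, h]
  | cons y t ih =>
    rw [List.pairwise_cons] at hl
    by_cases hxy : pvResKey y < pvResKey x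
    · simp only [PySem.List.insertBy, hxy, decide_true, if_pos]
      by_cases hx : pvResKey x = req
      · have hnone : (y :: t).find? (fun it => pvResKey it == req) = none := by
          rw [List.find?_eq_none]
          intro z hz
          have : pvResKey z ≤ pvResKey y := by
            rcases List.mem_cons.mp hz with rfl | hz'
            · exact le_refl _
            · exact hl.1 z hz'
          simp only [beq_iff_eq]
          omega
        rw [hnone]
        simp [List.find?, hx]
      · have hx' : (pvResKey x == req) = false := by simp [hx]
        simp [List.find?, hx']
    · simp only [PySem.List.insertBy, hxy, decide_false, if_neg, Bool.false_eq_true,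
        not_false_eq_true]
      cases hy : (pvResKey y == req)
      · simp only [List.find?, hy]
        exact ih hl.2
      · simp [List.find?, hy]

-- one snoc step of the reverse insertion sort
theorem pv_sorted_snoc (xs : List (List (String × String))) (x : List (String × String)) :
    PySem.List.sorted (xs ++ [x]) pvResKey true
      = PySem.List.insertBy (fun a b => decide (pvResKey b < pvResKey a)) x
          (PySem.List.sorted xs pvResKey true) := by
  rw [PySem.List.sorted_rev_eq_foldl_insertBy (xs ++ [x]), List.foldl_append, List.foldl_cons,
    List.foldl_nil, ← PySem.List.sorted_rev_eq_foldl_insertBy]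

-- stability of the whole reverse sort for a key-test: first match in sorted order
-- is the first match in the original order
theorem pv_find_sorted (req : Int) (xs : List (List (String × String))) :
    (PySem.List.sorted xs pvResKey true).find? (fun it => pvResKey it == req)
      = xs.find? (fun it => pvResKey it == req) := by
  induction xs using List.reverseRecOn with
  | nil => rfl
  | append_singleton xs x ih =>
    rw [pv_sorted_snoc,
      pv_find_insertBy req x _ (PySem.List.sorted_pairwise_rev xs pvResKey), ih,
      List.find?_append]
    cases h : (pvResKey x == req) <;> simp [List.find?, h]

-- B's running-maximum fold computes the head of A's reverse-sorted list (first among ties)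
theorem pv_best_fold (xs : List (List (String × String))) :
    xs.foldl
        (fun (s : Option (Int × List (String × String))) item =>
          match s with
          | none => some (pvResKey item, item)
          | some b => if pvResKey item > b.1 then some (pvResKey item, item) else some b)
        none
      = (PySem.List.sorted xs pvResKey true).head?.map (fun it => (pvResKey it, it)) := by
  induction xs using List.reverseRecOn with
  | nil => rfl
  | append_singleton xs x ih =>
    rw [List.foldl_append, List.foldl_cons, List.foldl_nil, ih, pv_sorted_snoc]
    cases hs : PySem.List.sorted xs pvResKey true with
    | nil => rfl
    | cons y t =>
      by_cases hxy : pvResKey y < pvResKey x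
      · simp [PySem.List.insertBy, hxy]
      · have : ¬ pvResKey x > pvResKey y := hxy
        simp [PySem.List.insertBy, hxy]

-- B's first-match fold is find?
theorem pv_match_fold (p : List (String × String) → Bool) (xs : List (List (String × String)))
    (acc : Option (List (String × String))) :
    xs.foldl
        (fun (m : Option (List (String × String))) it =>
          match m with
          | some m' => some m'
          | none => if p it then some it else none)
        acc
      = acc.or (xs.find? p) := by
  induction xs generalizing acc with
  | nil => cases acc <;> rfl
  | cons x t ih =>
    cases acc with
    | some m => rw [List.foldl_cons]; simp [ih]
    | none =>
      rw [List.foldl_cons]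
      cases h : p x <;> simp [h, ih, List.find?]

-- the whole of B's loop, split into its two independent accumulators
theorem pv_fold_split (requested : Option Int) (xs : List (List (String × String))) :
    xs.foldl
        (fun (s : Option (Int × List (String × String)) × Option (List (String × String))) item =>
          (match s.1 with
           | none => some (pvResKey item, item)
           | some b => if pvResKey item > b.1 then some (pvResKey item, item) else some b,
           match s.2 with
           | some m => some m
           | none => if (some (pvResKey item) : Option Int) == requested then some item else none))
        (none, none)
      = ((PySem.List.sorted xs pvResKey true).head?.map (fun it => (pvResKey it, it)),
         xs.find? (fun it => (some (pvResKey it) : Option Int) == requested)) := by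
  rw [PySem.List.foldl_prod_mk
      (f := fun (s : Option (Int × List (String × String))) item =>
        match s with
        | none => some (pvResKey item, item)
        | some b => if pvResKey item > b.1 then some (pvResKey item, item) else some b)
      (g := fun (m : Option (List (String × String))) item =>
        match m with
        | some m' => some m'
        | none => if (some (pvResKey item) : Option Int) == requested then some item else none)]
  rw [pv_best_fold, pv_match_fold]
  rfl

-- both programs pick the same item once requested is fixed
theorem pv_branches_none (xs : List (List (String × String))) :
    (match xs.find? (fun it => (some (pvResKey it) : Option Int) == (none : Option Int)) with
     | some m => m
     | none =>
       match (PySem.List.sorted xs pvResKey true).head?.map (fun it => (pvResKey it, it)) with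
       | some b => b.2
       | none => ([] : List (String × String)))
      = (PySem.List.sorted xs pvResKey true).head?.getD [] := by
  have h : xs.find? (fun it => (some (pvResKey it) : Option Int) == (none : Option Int)) = none := by
    rw [List.find?_eq_none]; intro z _; simp
  rw [h]
  cases PySem.List.sorted xs pvResKey true <;> rfl

theorem pv_branches_some (xs : List (List (String × String))) (req : Int) :
    (match xs.find? (fun it => (some (pvResKey it) : Option Int) == some req) with
     | some m => m
     | none =>
       match (PySem.List.sorted xs pvResKey true).head?.map (fun it => (pvResKey it, it)) with
       | some b => b.2
       | none => ([] : List (String × String)))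
      = (match (PySem.List.sorted xs pvResKey true).find? (fun it => pvResKey it == req) with
         | some item => item
         | none => (PySem.List.sorted xs pvResKey true).head?.getD []) := by
  have hp : (fun it => (some (pvResKey it) : Option Int) == some req)
      = (fun it => pvResKey it == req) := by
    funext it; simp
  rw [hp, ← pv_find_sorted req xs]
  cases hf : (PySem.List.sorted xs pvResKey true).find? (fun it => pvResKey it == req) with
  | some m => rfl
  | none => cases PySem.List.sorted xs pvResKey true <;> rfl

-- ===== VERDICT (by name: the statement is the Claim_ definition above) =====
theorem select_download_py_spec : Claim_equal_select_download_py := by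
  intro downloads quality _hdom _hpre
  show (if pvNormalizeQuality quality = "BEST" then
          (PySem.List.pyGet? (PySem.List.sorted downloads pvResKey true) 0).getD []
        else
          match pvExtractQualityValue (pvNormalizeQuality quality) with
          | none => (PySem.List.pyGet? (PySem.List.sorted downloads pvResKey true) 0).getD []
          | some requested =>
            match (PySem.List.sorted downloads pvResKey true).find?
                (fun item => pvResKey item == requested) with
            | some item => item
            | none => (PySem.List.pyGet? (PySem.List.sorted downloads pvResKey true) 0).getD [])
      = (match
          (downloads.foldl
            (fun (s : Option (Int × List (String × String)) × Option (List (String × String))) item =>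
              (match s.1 with
               | none => some (pvResKey item, item)
               | some b => if pvResKey item > b.1 then some (pvResKey item, item) else some b,
               match s.2 with
               | some m => some m
               | none =>
                 if (some (pvResKey item) : Option Int)
                     == (if pvNormalizeQuality quality = "BEST" then none
                         else pvExtractQualityValue (pvNormalizeQuality quality)) then some item
                 else none))
            (none, none)).2 with
         | some m => m
         | none =>
           match
             (downloads.foldl
               (fun (s : Option (Int × List (String × String)) × Option (List (String × String))) item =>
                 (match s.1 with
                  | none => some (pvResKey item, item)
                  | some b => if pvResKey item > b.1 then some (pvResKey item, item) else some b,
                  match s.2 with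
                  | some m => some m
                  | none =>
                    if (some (pvResKey item) : Option Int)
                        == (if pvNormalizeQuality quality = "BEST" then none
                            else pvExtractQualityValue (pvNormalizeQuality quality)) then some item
                    else none))
               (none, none)).1 with
           | some b => b.2
           | none => [])
  rw [pv_fold_split]
  by_cases hb : pvNormalizeQuality quality = "BEST"
  · simp only [hb, if_pos, pv_pyGet0]
    exact (pv_branches_none downloads).symm
  · simp only [hb, if_false, pv_pyGet0]
    cases hx : pvExtractQualityValue (pvNormalizeQuality quality) with
    | none => exact (pv_branches_none downloads).symm
    | some req => exact (pv_branches_some downloads req).symm
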